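-- pv_equiv track=rewrite | github.com/Sigmmma/reclaimer | reclaimer/resources/bitmap_module/ext/swizzler.py | _bit_swizzler
-- ===== SOURCE A (Python) =====
-- def _bit_swizzler(axis_offset, axis_mask):
--     '''axis_offset is the x, y, or z index who's bits we are swizzling
--     axis_mask is an array which is the length of Log2(Dimension). Each index
--     corrosponds to the equivelant bit in the dimension's binary form. The value
--     of each index is how far left the bit should be shifted. if the value is
--     negative then the bit will instead be shifted to the right by that amount.'''
--
--     #this will be used to store the index after we swizzle it's bits
--     swizzled_axis_offset = 0
--
--     ######################
--     '''NEEDS MORE SPEED'''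
--     ######################
--
--     #we loop through each of the bits in the axis_offset
--     for bit_idx in range(len(axis_mask)):
--         '''Mask off the value of the bit, shift it to the index it needs to be
--         in, and add the result to the return value "swizzled_axis_offset" '''
--         if axis_mask[bit_idx] < 0:
--             swizzled_axis_offset += (axis_offset&(1<<bit_idx)) >> (-1*axis_mask[bit_idx])
--         else:
--             swizzled_axis_offset += (axis_offset&(1<<bit_idx)) << axis_mask[bit_idx]
--
--     return swizzled_axis_offset
-- ===== SOURCE B (Python) =====
-- def _bit_swizzler(axis_offset, axis_mask):
--     # Data-driven set-bit iteration: mask the offset to len(axis_mask) bits,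
--     # then visit only the populated bits (highest first), sending each bit
--     # straight to its destination with one signed-offset formula.
--     v = axis_offset & ((1 << len(axis_mask)) - 1)
--     swizzled_axis_offset = 0
--     while v:
--         p = v.bit_length() - 1
--         dest = p + axis_mask[p]
--         if dest >= 0:
--             swizzled_axis_offset += 1 << dest
--         v -= 1 << p
--     return swizzled_axis_offset
-- ===== Notes on version B (the rewrite author's own statement) =====
-- stated objective: alternative
-- what changed: Replaces A's indexed scan of every mask position (mask off bit i with 1<<i, branch on the shift's sign) by a data-driven loop that masks the offset to len(axis_mask) bits once and then visits only the set bits (highest first via bit_length), sending each straight to its destination with a single signed dest = p + axis_mask[p] formula guarded by dest >= 0.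
import Mathlib
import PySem

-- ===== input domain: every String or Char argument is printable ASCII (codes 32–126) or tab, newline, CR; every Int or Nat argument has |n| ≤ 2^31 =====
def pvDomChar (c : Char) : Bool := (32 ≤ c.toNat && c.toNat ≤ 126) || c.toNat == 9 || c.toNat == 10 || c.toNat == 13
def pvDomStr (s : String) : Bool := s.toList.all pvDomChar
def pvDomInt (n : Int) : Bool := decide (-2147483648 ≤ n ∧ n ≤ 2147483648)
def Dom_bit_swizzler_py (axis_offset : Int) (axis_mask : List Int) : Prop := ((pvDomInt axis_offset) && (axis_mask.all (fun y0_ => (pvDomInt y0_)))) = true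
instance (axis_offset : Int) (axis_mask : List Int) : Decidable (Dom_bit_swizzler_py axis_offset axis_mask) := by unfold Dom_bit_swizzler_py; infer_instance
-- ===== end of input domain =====

-- B replaces A's full scan over every mask position by a set-bit iteration over the
-- masked offset (alternative decomposition with a single destination formula).


-- ===== PORT A =====
-- literal port of A: indexed loop over range(len(axis_mask)); axis_mask[bit_idx] is
-- always in range here, so List.getD is exact.
def bit_swizzler_py (axis_offset : Int) (axis_mask : List Int) : Int :=
  (List.range axis_mask.length).foldl
    (fun swizzled_axis_offset bit_idx =>
      if axis_mask.getD bit_idx 0 < 0 then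
        swizzled_axis_offset +
          (PySem.Int.band axis_offset ((1 : Int) <<< bit_idx)) >>> (-1 * axis_mask.getD bit_idx 0).toNat
      else
        swizzled_axis_offset +
          (PySem.Int.band axis_offset ((1 : Int) <<< bit_idx)) <<< (axis_mask.getD bit_idx 0).toNat)
    0

-- ===== PORT B =====
-- the `while v:` loop of Source B; v is nonnegative throughout (v = offset & mask), so the
-- guard `v ≤ 0` coincides with Python's `while v:` on every reachable state and gives
-- termination on v.toNat.  axis_mask[p] is in range (v < 2^len), so List.getD is exact.
def bit_swizzler_py_alt_loop (axis_mask : List Int) (v : Int) (swizzled_axis_offset : Int) : Int :=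
  if h : v ≤ 0 then swizzled_axis_offset
  else
    let p := PySem.Int.bitLength v - 1
    let dest := (p : Int) + axis_mask.getD p 0
    bit_swizzler_py_alt_loop axis_mask (v - ((1 : Int) <<< p))
      (if 0 ≤ dest then swizzled_axis_offset + ((1 : Int) <<< dest.toNat) else swizzled_axis_offset)
termination_by v.toNat
decreasing_by
  have hv : 0 < v := lt_of_not_ge (by simpa using h)
  have h1 : 2 ^ (PySem.Int.bitLength v - 1) ≤ v.natAbs :=
    PySem.Int.two_pow_bitLength_le v (by omega)
  have h2 : (0:Nat) < 2 ^ (PySem.Int.bitLength v - 1) := Nat.two_pow_pos _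
  have hna : v.natAbs = v.toNat := by omega
  simp only [Int.shiftLeft_eq, one_mul]
  have : ((2:Int) ^ (PySem.Int.bitLength v - 1)) = ((2 ^ (PySem.Int.bitLength v - 1) : Nat) : Int) := by
    push_cast; ring
  omega

def bit_swizzler_py_alt (axis_offset : Int) (axis_mask : List Int) : Int :=
  bit_swizzler_py_alt_loop axis_mask
    (PySem.Int.band axis_offset (((1 : Int) <<< axis_mask.length) - 1)) 0

-- ===== PRECONDITION & SPEC =====
def Spec_bit_swizzler_py (axis_offset : Int) (axis_mask : List Int) (out : Int) : Prop := out = bit_swizzler_py_alt axis_offset axis_mask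
instance (axis_offset : Int) (axis_mask : List Int) (out : Int) : Decidable (Spec_bit_swizzler_py axis_offset axis_mask out) := by unfold Spec_bit_swizzler_py; infer_instance

-- ===== CLAIM (what is proved, stated in full; the proofs are below) =====
def Claim_equal_bit_swizzler_py : Prop := ∀ (axis_offset : Int) (axis_mask : List Int), Dom_bit_swizzler_py axis_offset axis_mask → Spec_bit_swizzler_py axis_offset axis_mask (bit_swizzler_py axis_offset axis_mask)

-- ===== LEMMAS AND PROOFS =====

-- Python's bit i of axis_offset (infinite two's complement)
def pvBitA (a : Int) (i : Nat) : Bool :=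
  if 0 ≤ a then a.toNat.testBit i else !((-a - 1).toNat.testBit i)

-- contribution of a set bit at position i
def pvC (axis_mask : List Int) (i : Nat) : Int :=
  if 0 ≤ (i : Int) + axis_mask.getD i 0 then (2 : Int) ^ ((i : Int) + axis_mask.getD i 0).toNat else 0

-- canonical value: sum of contributions of the set bits below n
def pvG (axis_mask : List Int) (n : Nat) (w : Nat) : Int :=
  ∑ i ∈ Finset.range n, (if w.testBit i then pvC axis_mask i else 0)

-- the low-n-bits word Python's `a & ((1<<n)-1)` denotes
def pvW (a : Int) (n : Nat) : Nat :=
  if 0 ≤ a then a.toNat % 2 ^ n else 2 ^ n - 1 - (-a - 1).toNat % 2 ^ n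

theorem pvW_lt (a : Int) (n : Nat) : pvW a n < 2 ^ n := by
  unfold pvW
  have := Nat.two_pow_pos n
  split
  · exact Nat.mod_lt _ this
  · omega

theorem pvW_testBit (a : Int) (n i : Nat) :
    (pvW a n).testBit i = (decide (i < n) && pvBitA a i) := by
  unfold pvW pvBitA
  split
  · simp [Nat.testBit_mod_two_pow]
  · have hr : (-a - 1).toNat % 2 ^ n < 2 ^ n :=
      Nat.mod_lt _ (Nat.two_pow_pos n)
    have : 2 ^ n - 1 - (-a - 1).toNat % 2 ^ n = 2 ^ n - ((-a - 1).toNat % 2 ^ n + 1) := by omega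
    rw [this, Nat.testBit_two_pow_sub_succ hr, Nat.testBit_mod_two_pow]
    by_cases h : i < n <;> simp [h]

theorem pvBand_mask (a : Int) (n : Nat) :
    PySem.Int.band a (((1 : Int) <<< n) - 1) = ((pvW a n : Nat) : Int) := by
  have hpos := Nat.two_pow_pos n
  have h2 : ((1 : Int) <<< n) - 1 = (((2 ^ n - 1 : Nat)) : Int) := by
    rw [Int.shiftLeft_eq, one_mul]
    push_cast [hpos]
    ring
  have hN : (0:Int) ≤ (((2 ^ n - 1 : Nat)) : Int) := by positivity
  rw [h2]
  unfold PySem.Int.band pvW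
  by_cases ha : 0 ≤ a
  · rw [if_pos ha, if_pos hN, if_pos ha, Int.toNat_natCast, Nat.and_two_pow_sub_one_eq_mod]
  · rw [if_neg ha, if_pos hN, if_neg ha, Int.toNat_natCast, Nat.and_comm,
      Nat.and_two_pow_sub_one_eq_mod]

theorem pvBand_bit (a : Int) (i : Nat) :
    PySem.Int.band a ((1 : Int) <<< i) =
      (if pvBitA a i then ((2 ^ i : Nat) : Int) else 0) := by
  have h2 : (1 : Int) <<< i = ((2 ^ i : Nat) : Int) := by
    simp [Int.shiftLeft_eq]
  rw [h2]
  unfold PySem.Int.band pvBitA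
  split
  · have hnn : (0:Int) ≤ ((2 ^ i : Nat) : Int) := by positivity
    simp only [hnn, if_true, Int.toNat_natCast]
    rw [Nat.and_two_pow]
    cases h : a.toNat.testBit i <;> simp
  · have hnn : (0:Int) ≤ ((2 ^ i : Nat) : Int) := by positivity
    simp only [hnn, if_true, Int.toNat_natCast]
    rw [Nat.two_pow_and]
    cases h : (-a - 1).toNat.testBit i <;> simp

-- the body of A's loop produces exactly the bit's contribution
theorem pvA_term (a : Int) (axis_mask : List Int) (i : Nat) :
    (if axis_mask.getD i 0 < 0 then
        (PySem.Int.band a ((1 : Int) <<< i)) >>> (-1 * axis_mask.getD i 0).toNat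
      else
        (PySem.Int.band a ((1 : Int) <<< i)) <<< (axis_mask.getD i 0).toNat) =
      (if pvBitA a i then pvC axis_mask i else 0) := by
  rw [pvBand_bit]
  cases hb : pvBitA a i
  · simp [Int.shiftRight_eq_div_pow, Int.shiftLeft_eq]
  · simp only [if_true]
    set m := axis_mask.getD i 0 with hm
    unfold pvC
    rw [← hm]
    by_cases hneg : m < 0
    · simp only [hneg, if_true]
      rw [Int.shiftRight_eq_div_pow]
      have hdiv : (((2 ^ i : Nat) : Int)) / ((2 ^ ((-1 * m).toNat) : Nat) : Int) =
          (((2 ^ i / 2 ^ ((-1 * m).toNat) : Nat)) : Int) := by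
        exact_mod_cast rfl
      rw [hdiv]
      by_cases hd : 0 ≤ (i : Int) + m
      · have hk : (-1 * m).toNat ≤ i := by omega
        rw [if_pos hd, Nat.pow_div hk (by omega)]
        have : ((i : Int) + m).toNat = i - (-1 * m).toNat := by omega
        rw [this]
        push_cast
        ring
      · have hk : i < (-1 * m).toNat := by omega
        rw [if_neg hd, Nat.div_eq_of_lt (Nat.pow_lt_pow_right (by omega) hk)]
        simp
    · have hd : 0 ≤ (i : Int) + m := by omega
      have hdt : ((i : Int) + m).toNat = i + m.toNat := by omega
      simp only [hneg, if_false, hd, if_true, Int.shiftLeft_eq, hdt]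
      push_cast
      ring

-- A's fold equals the canonical sum over pvBitA
theorem pvA_eq_sum (a : Int) (axis_mask : List Int) (n : Nat) :
    (List.range n).foldl
      (fun acc i =>
        if axis_mask.getD i 0 < 0 then
          acc + (PySem.Int.band a ((1 : Int) <<< i)) >>> (-1 * axis_mask.getD i 0).toNat
        else
          acc + (PySem.Int.band a ((1 : Int) <<< i)) <<< (axis_mask.getD i 0).toNat) 0 =
    ∑ i ∈ Finset.range n, (if pvBitA a i then pvC axis_mask i else 0) := by
  induction n with
  | zero => simp
  | succ k ih =>
    rw [List.range_succ, List.foldl_append, Finset.sum_range_succ, ih]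
    simp only [List.foldl_cons, List.foldl_nil]
    have := pvA_term a axis_mask k
    split_ifs at this ⊢ <;> omega

theorem pvSum_eq_G (a : Int) (axis_mask : List Int) (n : Nat) :
    (∑ i ∈ Finset.range n, (if pvBitA a i then pvC axis_mask i else 0)) =
      pvG axis_mask n (pvW a n) := by
  unfold pvG
  apply Finset.sum_congr rfl
  intro i hi
  rw [pvW_testBit]
  simp [Finset.mem_range.mp hi]

theorem pvG_zero (axis_mask : List Int) (n : Nat) : pvG axis_mask n 0 = 0 := by
  simp [pvG]

theorem pvG_split (axis_mask : List Int) (n p w' : Nat) (hw : w' < 2 ^ p) (hp : p < n) :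
    pvG axis_mask n (2 ^ p + w') = pvC axis_mask p + pvG axis_mask n w' := by
  unfold pvG
  have key : ∀ i, (if (2 ^ p + w').testBit i then pvC axis_mask i else 0) =
      (if i = p then pvC axis_mask p else 0) + (if w'.testBit i then pvC axis_mask i else 0) := by
    intro i
    rcases lt_trichotomy i p with h | h | h
    · rw [Nat.testBit_two_pow_add_gt h]
      simp [Nat.ne_of_lt h]
    · subst h
      rw [Nat.testBit_two_pow_add_eq, Nat.testBit_lt_two_pow hw]
      simp
    · have hlt : 2 ^ p + w' < 2 ^ i := by
        have : 2 ^ (p + 1) ≤ 2 ^ i := Nat.pow_le_pow_right (by omega) (by omega)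
        have : 2 ^ p + w' < 2 ^ (p+1) := by
          rw [Nat.pow_succ]; omega
        omega
      have hlt' : w' < 2 ^ i := by omega
      rw [Nat.testBit_lt_two_pow hlt, Nat.testBit_lt_two_pow hlt']
      simp [Nat.ne_of_gt h]
  calc (∑ i ∈ Finset.range n, (if (2 ^ p + w').testBit i then pvC axis_mask i else 0))
      = ∑ i ∈ Finset.range n, ((if i = p then pvC axis_mask p else 0) +
          (if w'.testBit i then pvC axis_mask i else 0)) := Finset.sum_congr rfl (fun i _ => key i)
    _ = pvC axis_mask p + pvG axis_mask n w' := by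
        rw [Finset.sum_add_distrib, Finset.sum_ite_eq' (Finset.range n) p]
        simp [Finset.mem_range.mpr hp, pvG]

-- invariant of B's loop
theorem pvLoop_eq (axis_mask : List Int) (n : Nat) (hn : n = axis_mask.length) :
    ∀ w : Nat, w < 2 ^ n → ∀ acc : Int,
      bit_swizzler_py_alt_loop axis_mask ((w : Nat) : Int) acc = acc + pvG axis_mask n w := by
  intro w
  induction w using Nat.strong_induction_on with
  | _ w ih =>
    intro hwn acc
    rw [bit_swizzler_py_alt_loop]
    by_cases hw0 : w = 0
    · subst hw0
      simp [pvG_zero]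
    · have hpos : ¬ ((w : Int) ≤ 0) := by
        simp only [not_le]
        exact_mod_cast Nat.pos_of_ne_zero hw0
      simp only [hpos, dif_neg, not_false_iff]
      set p := PySem.Int.bitLength ((w : Nat) : Int) - 1 with hpdef
      have hble : 2 ^ p ≤ w := by
        have := PySem.Int.two_pow_bitLength_le ((w : Nat) : Int) (by exact_mod_cast hw0)
        simpa using this
      have hblt : w < 2 ^ (p + 1) := by
        have h1 := PySem.Int.lt_two_pow_bitLength ((w : Nat) : Int)
        have hbl_pos : 1 ≤ PySem.Int.bitLength ((w : Nat) : Int) := by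
          by_contra hc
          have : PySem.Int.bitLength ((w : Nat) : Int) = 0 := by omega
          rw [this] at h1
          simp at h1
          omega
        have : p + 1 = PySem.Int.bitLength ((w : Nat) : Int) := by omega
        rw [this]
        simpa using h1
      have hpn : p < n := by
        by_contra hc
        have : 2 ^ n ≤ 2 ^ p := Nat.pow_le_pow_right (by omega) (by omega)
        omega
      have hsub : ((w : Nat) : Int) - ((1:Int) <<< p) = (((w - 2 ^ p : Nat)) : Int) := by
        rw [Int.shiftLeft_eq, one_mul]
        push_cast [hble]
        ring
      rw [hsub]
      have hdec : w - 2 ^ p < w := by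
        have : 0 < 2 ^ p := Nat.two_pow_pos _
        omega
      rw [ih (w - 2 ^ p) hdec (by omega) _]
      have hsplitw : w = 2 ^ p + (w - 2 ^ p) := by omega
      have hw'lt : w - 2 ^ p < 2 ^ p := by
        rw [Nat.pow_succ] at hblt
        omega
      rw [show pvG axis_mask n w = pvG axis_mask n (2 ^ p + (w - 2 ^ p)) by rw [← hsplitw],
        pvG_split axis_mask n p _ hw'lt hpn]
      unfold pvC
      split_ifs with hd
      · rw [Int.shiftLeft_eq, one_mul]
        ring
      · ring

-- ===== VERDICT (by name: the statement is the Claim_ definition above) =====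
theorem bit_swizzler_py_spec : Claim_equal_bit_swizzler_py := by
  intro axis_offset axis_mask _
  unfold Spec_bit_swizzler_py bit_swizzler_py bit_swizzler_py_alt
  rw [pvBand_mask]
  rw [pvLoop_eq axis_mask axis_mask.length rfl (pvW axis_offset axis_mask.length)
      (pvW_lt _ _)]
  rw [pvA_eq_sum, pvSum_eq_G]
  ring
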